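-- pv_equiv track=rewrite | github.com/alejocp00/DAA-Project | Ejercicio 3/subuniverses_greedy.py | exact_set_cover_greedy
-- ===== SOURCE A (Python) =====
-- def exact_set_cover_greedy(universe, subsets):
--     used_subsets = []
--     subsets = list(sorted(subsets, key=lambda x: len(x), reverse=True))
--
--     def backtrack_greedy(covered, index):
--         if covered == universe:
--             return True
--         if index >= len(subsets):
--             return False
--
--
--         for i in range(index, len(subsets)):
--             subset = subsets[i]
--             # Verificamos si el subconjunto no comparte elementos ya cubiertos. Operador & es para la interseccion
--             if not covered & subset:
--                 used_subsets.append(subset)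
--                 if backtrack_greedy(covered | subset, i + 1): # Operador | es para la union
--                     return True
--                 used_subsets.pop()
--         return False
--
--     if backtrack_greedy(set(), 0):
--         return used_subsets
--     else:
--         return None
-- ===== SOURCE B (Python) =====
-- def exact_set_cover_greedy(universe, subsets):
--     # Iterative DFS with an explicit frame stack instead of recursion; same
--     # descending-size order, same exploration order, same returned cover.
--     ss = sorted(subsets, key=len, reverse=True)
--     n = len(ss)
--     chosen = []
--     stack = [(set(), 0)]
--     while stack:
--         covered, i = stack[-1]
--         if covered == universe:
--             return chosen
--         j = i
--         while j < n and covered & ss[j]: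
--             j += 1
--         if j < n:
--             stack[-1] = (covered, j + 1)
--             chosen.append(ss[j])
--             stack.append((covered | ss[j], j + 1))
--         else:
--             stack.pop()
--             if stack:
--                 chosen.pop()
--     return None
-- ===== Notes on version B (the rewrite author's own statement) =====
-- stated objective: alternative
-- what changed: Replaced the recursive backtracking helper that mutates a shared used_subsets list with an explicit iterative DFS over a stack of (covered, next-index) frames, keeping used-subsets in sync by push on descent and pop on frame exhaustion; same descending-size sort, same exploration order and returned cover.
import Mathlib
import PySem

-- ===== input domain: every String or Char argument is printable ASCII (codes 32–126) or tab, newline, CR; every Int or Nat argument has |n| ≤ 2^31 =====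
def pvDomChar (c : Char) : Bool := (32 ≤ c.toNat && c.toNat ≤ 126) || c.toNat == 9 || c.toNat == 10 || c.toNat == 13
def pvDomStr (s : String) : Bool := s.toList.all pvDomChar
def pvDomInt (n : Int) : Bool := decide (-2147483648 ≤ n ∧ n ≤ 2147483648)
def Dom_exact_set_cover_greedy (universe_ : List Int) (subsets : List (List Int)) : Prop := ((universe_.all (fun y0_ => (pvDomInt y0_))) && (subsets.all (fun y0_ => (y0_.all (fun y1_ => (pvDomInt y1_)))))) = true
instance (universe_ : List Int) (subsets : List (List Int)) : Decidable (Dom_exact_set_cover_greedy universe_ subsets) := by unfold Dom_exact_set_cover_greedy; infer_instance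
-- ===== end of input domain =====

-- B replaces A's recursive backtracking helper (mutable shared list + bool result)
-- by an explicit iterative DFS over a stack of (covered, next-index) frames;
-- same exploration order, same returned cover.  Objective: alternative decomposition.

-- ===== PORT A =====
-- backtrack_greedy, with the mutable `used_subsets` threaded through as state:
-- btA returns (the bool Python returns, the state of used_subsets afterwards);
-- loopA is the `for i in range(index, len(subsets))` loop.
mutual
def btA (universe_ : List Int) (ss : List (List Int)) (cov : List Int)
    (idx : Nat) (used : List (List Int)) : Bool × List (List Int) :=
  if PySem.Set.equal cov universe_ then (true, used)
  else if ss.length ≤ idx then (false, used)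
  else loopA universe_ ss cov idx used
  termination_by (ss.length - idx, 1)

def loopA (universe_ : List Int) (ss : List (List Int)) (cov : List Int)
    (i : Nat) (used : List (List Int)) : Bool × List (List Int) :=
  if h : i < ss.length then
    let s := ss[i]
    if (PySem.Set.inter cov s).isEmpty then
      let r := btA universe_ ss (PySem.Set.union cov s) (i + 1) (used ++ [s])
      if r.1 then r
      else loopA universe_ ss cov (i + 1) r.2.dropLast   -- used_subsets.pop()
    else loopA universe_ ss cov (i + 1) used
  else (false, used)
  termination_by (ss.length - i, 0)
end

def exact_set_cover_greedy (universe_ : List Int) (subsets : List (List Int)) :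
    Option (List (List Int)) :=
  let ss := PySem.List.sorted subsets (fun x => x.length) true
  let r := btA universe_ ss PySem.Set.empty 0 []
  if r.1 then some r.2 else none

-- ===== PORT B =====
-- the inner `while j < n and covered & ss[j]: j += 1` scan
def scanB (ss : List (List Int)) (cov : List Int) (j : Nat) : Nat :=
  if h : j < ss.length then
    if (PySem.Set.inter cov ss[j]).isEmpty then j else scanB ss cov (j + 1)
  else j
  termination_by ss.length - j

-- the `while stack:` loop; `fuel` only makes it total in Lean (3^|ss|+1 is
-- proved sufficient below: the measure muB decreases at every iteration).
def stepB (universe_ : List Int) (ss : List (List Int)) :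
    Nat → List (List Int × Nat) → List (List Int) → Option (List (List Int))
  | _, [], _ => none
  | 0, _ :: _, _ => none
  | fuel + 1, (cov, i) :: rest, chosen =>
    if PySem.Set.equal cov universe_ then some chosen
    else
      let j := scanB ss cov i
      if h : j < ss.length then
        stepB universe_ ss fuel
          ((PySem.Set.union cov ss[j], j + 1) :: (cov, j + 1) :: rest)
          (chosen ++ [ss[j]])
      else
        stepB universe_ ss fuel rest
          (if rest.isEmpty then chosen else chosen.dropLast)

def exact_set_cover_greedy_alt (universe_ : List Int) (subsets : List (List Int)) :
    Option (List (List Int)) :=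
  let ss := PySem.List.sorted subsets (fun x => x.length) true
  stepB universe_ ss (3 ^ ss.length + 1) [(PySem.Set.empty, 0)] []

-- ===== PRECONDITION & SPEC =====
def Spec_exact_set_cover_greedy (universe_ : List Int) (subsets : List (List Int)) (out : Option (List (List Int))) : Prop := out = exact_set_cover_greedy_alt universe_ subsets
instance (universe_ : List Int) (subsets : List (List Int)) (out : Option (List (List Int))) : Decidable (Spec_exact_set_cover_greedy universe_ subsets out) := by unfold Spec_exact_set_cover_greedy; infer_instance

-- ===== CLAIM (what is proved, stated in full; the proofs are below) =====
def Claim_equal_exact_set_cover_greedy : Prop := ∀ (universe_ : List Int) (subsets : List (List Int)), Dom_exact_set_cover_greedy universe_ subsets → Spec_exact_set_cover_greedy universe_ subsets (exact_set_cover_greedy universe_ subsets)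

-- ===== LEMMAS AND PROOFS =====

-- A-side continuation semantics of a frame stack: run the recursion on the top
-- frame; on failure restore `chosen` and continue with the parent frames.
def runA (universe_ : List Int) (ss : List (List Int)) :
    List (List Int × Nat) → List (List Int) → Option (List (List Int))
  | [], _ => none
  | (cov, i) :: rest, chosen =>
    let r := btA universe_ ss cov i chosen
    if r.1 then some r.2
    else runA universe_ ss rest (if rest.isEmpty then r.2 else r.2.dropLast)

-- termination measure of B's machine
def muB (n : Nat) (stack : List (List Int × Nat)) : Nat :=
  (stack.map (fun f => 3 ^ (n - f.2))).sum

lemma scanB_le (ss : List (List Int)) (cov : List Int) :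
    ∀ j, j ≤ scanB ss cov j := by
  intro j
  induction hk : ss.length - j using Nat.strong_induction_on generalizing j with
  | _ k ih =>
    rw [scanB]
    split
    · split
      · exact le_refl j
      · exact Nat.le_trans (Nat.le_succ j) (ih (ss.length - (j+1)) (by omega) _ rfl)
    · exact le_refl j

lemma loopA_eq (universe_ : List Int) (ss : List (List Int)) (cov : List Int) :
    ∀ i used, loopA universe_ ss cov i used =
      (let j := scanB ss cov i
       if h : j < ss.length then
         (let r := btA universe_ ss (PySem.Set.union cov ss[j]) (j + 1) (used ++ [ss[j]])
          if r.1 then r else loopA universe_ ss cov (j + 1) r.2.dropLast)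
       else (false, used)) := by
  intro i
  induction hk : ss.length - i using Nat.strong_induction_on generalizing i with
  | _ k ih =>
    intro used
    rw [loopA]
    by_cases h : i < ss.length
    · rw [dif_pos h]
      by_cases hd : (PySem.Set.inter cov ss[i]).isEmpty = true
      · conv_rhs => rw [scanB]
        simp only [dif_pos h, hd, if_true]
      · conv_rhs => rw [scanB]
        simp only [dif_pos h, if_neg hd]
        rw [ih (ss.length - (i + 1)) (by omega) _ rfl]
    · rw [dif_neg h]
      conv_rhs => rw [scanB]
      rw [dif_neg h, dif_neg h]

-- given ¬equal, btA is exactly loopA (the idx ≥ len check agrees with loopA's)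
lemma btA_eq_loopA (universe_ : List Int) (ss : List (List Int)) (cov : List Int)
    (i : Nat) (used : List (List Int))
    (hne : PySem.Set.equal cov universe_ = false) :
    btA universe_ ss cov i used = loopA universe_ ss cov i used := by
  rw [btA, hne]
  simp only [Bool.false_eq_true, if_false]
  by_cases h : ss.length ≤ i
  · rw [if_pos h, loopA, dif_neg (by omega)]
  · rw [if_neg h]

lemma stepB_eq_runA (universe_ : List Int) (ss : List (List Int)) :
    ∀ fuel stack chosen, muB ss.length stack < fuel →
      stepB universe_ ss fuel stack chosen = runA universe_ ss stack chosen := by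
  intro fuel
  induction fuel with
  | zero => intro stack chosen h; omega
  | succ fuel ih =>
    intro stack chosen hfuel
    match stack with
    | [] => rfl
    | (cov, i) :: rest =>
      rw [stepB, runA]
      cases hne : PySem.Set.equal cov universe_ with
      | true => rw [btA, hne]; simp
      | false =>
        simp only [Bool.false_eq_true, if_false]
        set j := scanB ss cov i with hj
        have hij : i ≤ j := scanB_le ss cov i
        by_cases h : j < ss.length
        · rw [dif_pos h]
          -- measure decreases strictly: 2·3^(n-j-1) < 3^(n-i)
          have hdec : muB ss.length
              ((PySem.Set.union cov ss[j], j + 1) :: (cov, j + 1) :: rest)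
              < muB ss.length ((cov, i) :: rest) := by
            simp only [muB, List.map_cons, List.sum_cons]
            have h1 : 3 ^ (ss.length - (j + 1)) + 3 ^ (ss.length - (j + 1))
                < 3 ^ (ss.length - i) := by
              have : ss.length - i ≥ (ss.length - (j + 1)) + 1 := by omega
              calc 3 ^ (ss.length - (j + 1)) + 3 ^ (ss.length - (j + 1))
                  < 3 * 3 ^ (ss.length - (j + 1)) := by
                    have := pow_pos (show 0 < 3 by norm_num) (ss.length - (j + 1))
                    omega
                _ = 3 ^ ((ss.length - (j + 1)) + 1) := by ring
                _ ≤ 3 ^ (ss.length - i) := Nat.pow_le_pow_right (by norm_num) this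
            omega
          rw [ih _ _ (by omega)]
          -- unfold the A side: btA cov i = loopA cov i, characterised by scanB
          rw [btA_eq_loopA _ _ _ _ _ hne, loopA_eq, ← hj, dif_pos h]
          rw [runA]
          simp only []
          set r := btA universe_ ss (PySem.Set.union cov ss[j]) (j + 1)
            (chosen ++ [ss[j]]) with hr
          by_cases hr1 : r.1
          · simp [hr1]
          · have hr1' : r.1 = false := by simpa using hr1
            simp only [hr1', Bool.false_eq_true, if_false]
            rw [runA]
            simp only [List.isEmpty_cons, Bool.false_eq_true, if_false]
            rw [btA_eq_loopA _ _ _ _ _ hne]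
        · rw [dif_neg h]
          have hdec : muB ss.length rest < muB ss.length ((cov, i) :: rest) := by
            simp only [muB, List.map_cons, List.sum_cons]
            have := pow_pos (show 0 < 3 by norm_num) (ss.length - i)
            omega
          rw [ih _ _ (by omega)]
          have hA : btA universe_ ss cov i chosen = (false, chosen) := by
            rw [btA_eq_loopA _ _ _ _ _ hne, loopA_eq, ← hj, dif_neg h]
          rw [hA]
          simp

-- ===== VERDICT (by name: the statement is the Claim_ definition above) =====
theorem exact_set_cover_greedy_spec : Claim_equal_exact_set_cover_greedy := by
  intro universe_ subsets _
  unfold Spec_exact_set_cover_greedy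
  unfold exact_set_cover_greedy exact_set_cover_greedy_alt
  set ss := PySem.List.sorted subsets (fun x => x.length) true with hss
  rw [stepB_eq_runA universe_ ss (3 ^ ss.length + 1) [(PySem.Set.empty, 0)] []
      (by simp [muB])]
  rw [runA]
  simp only [List.isEmpty_nil, if_true]
  set r := btA universe_ ss PySem.Set.empty 0 [] with hr
  by_cases h1 : r.1
  · simp [h1]
  · have : r.1 = false := by simpa using h1
    simp [this, runA]
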